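-- pv_equiv track=rewrite | github.com/xynnnaaa/Sampler_CE | join_sampling/join_sampler_bitmap_py.py | prepare_pid_to_qid_map
-- ===== SOURCE A (Python) =====
-- from collections import defaultdict
--
-- def prepare_pid_to_qid_map(template_data):
--     """
--     为当前 Template 构建 PID -> QID Bitmap (Int) 的映射。
--     用于 greedy_join_selection 中的 Python 端翻译。
--     """
--
--     # template_data['table_pids']: {alias: {qid: pid}}
--     table_pids = template_data['table_pids']
--     total_queries = template_data['queries_count']
--
--     pid_map = defaultdict(dict)
--     global_map = defaultdict(int)
--
--     for alias, qid_pid_map in table_pids.items():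
--         temp_pid_groups = defaultdict(list)
--         temp_globals = []
--
--         for qid, pid in qid_pid_map.items():
--             if pid == -1:
--                 temp_globals.append(qid)
--             else:
--                 temp_pid_groups[pid].append(qid)
--
--         g_mask = 0
--         for q in temp_globals:
--             g_mask |= (1 << q)
--         global_map[alias] = g_mask
--
--         for pid, qid_list in temp_pid_groups.items():
--             mask = 0
--             for q in qid_list:
--                 mask |= (1 << q)
--             pid_map[alias][pid] = mask
--
--     return pid_map, global_map
-- ===== SOURCE B (Python) =====
-- from collections import defaultdict
--
-- def prepare_pid_to_qid_map(template_data):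
--     table_pids = template_data['table_pids']
--     total_queries = template_data['queries_count']  # same interface read as the original (unused)
--
--     def or_mask(qids):
--         m = 0
--         for q in qids:
--             m |= 1 << q
--         return m
--
--     pid_map = defaultdict(dict)
--     global_map = defaultdict(int)
--
--     for alias, qid_pid_map in table_pids.items():
--         items = list(qid_pid_map.items())
--         global_map[alias] = or_mask(q for q, p in items if p == -1)
--         # one entry per distinct non-global pid (first-occurrence order), mask by rescan
--         for pid in dict.fromkeys(p for _, p in items if p != -1):
--             pid_map[alias][pid] = or_mask(q for q, p in items if p == pid)
--
--     return pid_map, global_map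
-- ===== Notes on version B (the rewrite author's own statement) =====
-- stated objective: alternative
-- what changed: B removes A's group-qids-into-lists-then-OR construction entirely: per alias it computes the global mask by one OR over the qids whose pid is -1, then for each DISTINCT non-global pid (dict.fromkeys, first-occurrence order) rescans the alias's items and ORs the matching qids directly, so no temp_pid_groups/temp_globals structures exist.
-- outside the precondition, e.g. on prepare_pid_to_qid_map({'queries_count': {}}): A raises KeyError, B raises KeyError
import Mathlib
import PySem

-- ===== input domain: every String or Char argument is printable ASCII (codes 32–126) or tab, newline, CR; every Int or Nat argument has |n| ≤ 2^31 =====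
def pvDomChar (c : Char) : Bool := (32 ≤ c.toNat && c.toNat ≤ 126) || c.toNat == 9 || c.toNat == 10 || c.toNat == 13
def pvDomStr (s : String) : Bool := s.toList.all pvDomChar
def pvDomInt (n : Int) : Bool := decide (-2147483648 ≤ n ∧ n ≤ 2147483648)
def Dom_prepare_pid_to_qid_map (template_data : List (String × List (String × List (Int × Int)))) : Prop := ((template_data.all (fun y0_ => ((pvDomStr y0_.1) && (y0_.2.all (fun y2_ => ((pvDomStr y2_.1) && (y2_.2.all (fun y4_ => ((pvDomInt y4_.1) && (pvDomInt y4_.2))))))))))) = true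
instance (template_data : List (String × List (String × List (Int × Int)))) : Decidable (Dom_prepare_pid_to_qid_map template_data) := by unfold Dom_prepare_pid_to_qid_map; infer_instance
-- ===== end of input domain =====

-- B drops A's group-then-mask construction: per alias it ORs the global qids directly and, for
-- each distinct non-global pid, rescans the alias's (qid, pid) items to OR the matching qids
-- (objective: alternative — no temp grouping structures); same return values on Pre_.

-- m | (1 << q)  — exact for 0 ≤ q (Pre_ guarantees 0 ≤ qid; Python raises ValueError on a negative shift)
def pvShiftOr (m q : Int) : Int := PySem.Int.bor m ((1 : Int) <<< q.toNat)

-- ===== PORT A =====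
-- inner grouping loop of A: state = (temp_pid_groups, temp_globals)
def pvGroupStep (t : PySem.Dict Int (List Int) × List Int) (qp : Int × Int) :
    PySem.Dict Int (List Int) × List Int :=
  if qp.2 = -1 then (t.1, t.2 ++ [qp.1]) else (t.1.modify qp.2 [] (· ++ [qp.1]), t.2)

-- one iteration of A's outer loop over aliases
def pvAStep (st : PySem.Dict String (PySem.Dict Int Int) × PySem.Dict String Int)
    (av : String × List (Int × Int)) :
    PySem.Dict String (PySem.Dict Int Int) × PySem.Dict String Int :=
  let tmp := av.2.foldl pvGroupStep (PySem.Dict.empty, [])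
  let g_mask := tmp.2.foldl pvShiftOr 0
  let gm := st.2.insert av.1 g_mask
  let pm := tmp.1.items.foldl
    (fun pm g => pm.modify av.1 PySem.Dict.empty
      (fun inner => inner.insert g.1 (g.2.foldl pvShiftOr 0))) st.1
  (pm, gm)

def prepare_pid_to_qid_map (template_data : List (String × List (String × List (Int × Int)))) :
    (List (String × List (Int × Int))) × (List (String × Int)) :=
  let td := PySem.Dict.ofList template_data
  let table_pids := td.getD "table_pids" []       -- KeyError when the key is absent: excluded by Pre_
  let _total_queries := td.getD "queries_count" []  -- read and unused, as in A; KeyError excluded by Pre_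
  let st := table_pids.foldl pvAStep (PySem.Dict.empty, PySem.Dict.empty)
  (st.1.items.map (fun p => (p.1, p.2.items)), st.2.items)

-- ===== PORT B =====
-- or_mask helper of B: OR of (1 << q) over a qid sequence
def pvOrMask (qs : List Int) : Int := qs.foldl pvShiftOr 0

-- one iteration of B's outer loop: global mask by one filtered OR, then one pid_map entry per
-- distinct non-global pid (dict.fromkeys order) with a rescan of the alias's items
def pvBAliasStep (st : PySem.Dict String (PySem.Dict Int Int) × PySem.Dict String Int)
    (av : String × List (Int × Int)) :
    PySem.Dict String (PySem.Dict Int Int) × PySem.Dict String Int :=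
  let items := av.2
  let gm := st.2.insert av.1 (pvOrMask ((items.filter (fun qp => qp.2 == -1)).map Prod.fst))
  let pids := PySem.List.dedup ((items.filter (fun qp => !(qp.2 == -1))).map Prod.snd)
  let pm := pids.foldl
    (fun pm pid => pm.modify av.1 PySem.Dict.empty
      (fun inner => inner.insert pid
        (pvOrMask ((items.filter (fun qp => qp.2 == pid)).map Prod.fst)))) st.1
  (pm, gm)

def prepare_pid_to_qid_map_alt (template_data : List (String × List (String × List (Int × Int)))) :
    (List (String × List (Int × Int))) × (List (String × Int)) :=
  let td := PySem.Dict.ofList template_data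
  let table_pids := td.getD "table_pids" []
  let _total_queries := td.getD "queries_count" []
  let st := table_pids.foldl pvBAliasStep (PySem.Dict.empty, PySem.Dict.empty)
  (st.1.items.map (fun p => (p.1, p.2.items)), st.2.items)

-- ===== PRECONDITION & SPEC =====
-- Pre_ excludes (a) inputs missing the 'table_pids' or 'queries_count' key, where A raises KeyError,
-- (b) a negative qid, where A raises ValueError on 1 << qid, and (c) association lists with duplicate
-- dict keys, which a real Python dict cannot carry (their collapse order is a representation artefact).
def Pre_prepare_pid_to_qid_map (template_data : List (String × List (String × List (Int × Int)))) : Prop :=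
  (template_data.map Prod.fst).Nodup ∧
  "table_pids" ∈ template_data.map Prod.fst ∧
  "queries_count" ∈ template_data.map Prod.fst ∧
  ∀ p ∈ template_data, p.1 = "table_pids" →
    ((p.2.map Prod.fst).Nodup ∧
     ∀ av ∈ p.2, (av.2.map Prod.fst).Nodup ∧ ∀ qp ∈ av.2, 0 ≤ qp.1)
instance (template_data : List (String × List (String × List (Int × Int)))) : Decidable (Pre_prepare_pid_to_qid_map template_data) := by unfold Pre_prepare_pid_to_qid_map; infer_instance

def pvWitness_prepare_pid_to_qid_map : (List (String × List (String × List (Int × Int)))) :=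
  [("table_pids", [("t", [(0, -1), (1, 2)]), ("u", [])]), ("queries_count", [])]

def Spec_prepare_pid_to_qid_map (template_data : List (String × List (String × List (Int × Int)))) (out : (List (String × List (Int × Int))) × (List (String × Int))) : Prop := out = prepare_pid_to_qid_map_alt template_data
instance (template_data : List (String × List (String × List (Int × Int)))) (out : (List (String × List (Int × Int))) × (List (String × Int))) : Decidable (Spec_prepare_pid_to_qid_map template_data out) := by unfold Spec_prepare_pid_to_qid_map; infer_instance

-- ===== CLAIM (what is proved, stated in full; the proofs are below) =====
def Claim_equal_prepare_pid_to_qid_map : Prop := ∀ (template_data : List (String × List (String × List (Int × Int)))), Dom_prepare_pid_to_qid_map template_data → Pre_prepare_pid_to_qid_map template_data → Spec_prepare_pid_to_qid_map template_data (prepare_pid_to_qid_map template_data)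

-- ===== LEMMAS AND PROOFS =====

-- globals / non-globals of one alias's (qid, pid) list
def pvGlob (l : List (Int × Int)) : List Int := (l.filter (fun qp => qp.2 == -1)).map Prod.fst
def pvNG (l : List (Int × Int)) : List (Int × Int) := l.filter (fun qp => !(qp.2 == -1))
-- the grouping fold of A, on groups only
def pvGStep (d : PySem.Dict Int (List Int)) (qp : Int × Int) : PySem.Dict Int (List Int) :=
  d.modify qp.2 [] (· ++ [qp.1])

theorem pv_A_split (l : List (Int × Int)) (t : PySem.Dict Int (List Int) × List Int) :
    l.foldl pvGroupStep t = ((pvNG l).foldl pvGStep t.1, t.2 ++ pvGlob l) := by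
  induction l generalizing t with
  | nil => simp [pvGlob, pvNG]
  | cons x xs ih =>
      by_cases h : x.2 = -1 <;>
        simp [List.foldl_cons, pvGroupStep, ih, pvGlob, pvNG, h, pvGStep]

-- the grouping fold through the key/value-swapped standard shape
theorem pv_gfold_swap (l : List (Int × Int)) (d : PySem.Dict Int (List Int)) :
    l.foldl pvGStep d =
      (l.map Prod.swap).foldl (fun d p => d.modify p.1 [] (· ++ [p.2])) d := by
  rw [List.foldl_map]; rfl

theorem pv_grouped_getD (l : List (Int × Int)) (pid : Int) :
    ((pvNG l).foldl pvGStep PySem.Dict.empty).getD pid [] =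
      ((pvNG l).filter (fun qp => qp.2 == pid)).map Prod.fst := by
  rw [pv_gfold_swap, PySem.Dict.getD_foldl_modify_append]
  simp [List.filter_map, Function.comp_def, Prod.swap]

theorem pv_grouped_keys (l : List (Int × Int)) :
    ((pvNG l).foldl pvGStep PySem.Dict.empty).keys =
      PySem.List.dedup ((pvNG l).map Prod.snd) := by
  rw [pv_gfold_swap]
  rw [show (fun (d : PySem.Dict Int (List Int)) (p : Int × Int) => d.modify p.1 [] (· ++ [p.2]))
      = (fun d p => d.modify (Prod.fst p) [] ((fun _ p => (· ++ [p.2])) d p)) from rfl]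
  rw [PySem.Dict.keys_foldl_modify_key]
  simp [PySem.Dict.keys_empty, List.map_map, Function.comp_def, Prod.swap,
    PySem.List.dedup_eq_ofList]
  rfl

theorem pv_grouped_nodup (l : List (Int × Int)) :
    ((pvNG l).foldl pvGStep PySem.Dict.empty).keys.Nodup := by
  rw [pv_grouped_keys]; exact PySem.List.nodup_dedup _

theorem pv_grouped_items (l : List (Int × Int)) :
    ((pvNG l).foldl pvGStep PySem.Dict.empty).items =
      (PySem.List.dedup ((pvNG l).map Prod.snd)).map
        (fun p => (p, ((pvNG l).filter (fun qp => qp.2 == p)).map Prod.fst)) := by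
  rw [PySem.Dict.items_eq_map_keys _ (pv_grouped_nodup l) [], pv_grouped_keys]
  exact List.map_congr_left (fun p _ => by rw [pv_grouped_getD])

-- rescanning the full list for a non-global pid sees exactly the non-global entries with that pid
theorem pv_filter_full (l : List (Int × Int)) (pid : Int) (h : pid ≠ -1) :
    l.filter (fun qp => qp.2 == pid) = (pvNG l).filter (fun qp => qp.2 == pid) := by
  rw [pvNG, List.filter_filter]
  refine (List.filter_congr ?_).symm
  intro qp _
  by_cases hq : qp.2 = pid <;> simp [hq, h]

-- one alias: A's grouped mask-building loop equals B's dedup-and-rescan loop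
theorem pv_alias_step (st : PySem.Dict String (PySem.Dict Int Int) × PySem.Dict String Int)
    (av : String × List (Int × Int)) : pvAStep st av = pvBAliasStep st av := by
  simp only [pvAStep, pvBAliasStep, pv_A_split, List.nil_append]
  refine Prod.ext ?_ rfl
  show (((pvNG av.2).foldl pvGStep PySem.Dict.empty).items).foldl _ st.1 = _
  rw [pv_grouped_items, List.foldl_map]
  refine PySem.List.foldl_congr_mem _ _ _ _ ?_
  intro acc pid hpid
  have hne : pid ≠ -1 := by
    rw [PySem.List.mem_dedup] at hpid
    obtain ⟨qp, hqp, rfl⟩ := List.mem_map.mp hpid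
    have := List.of_mem_filter hqp
    simpa using this
  simp only [pvOrMask, pv_filter_full av.2 pid hne]

-- ===== VERDICT (by name: the statement is the Claim_ definition above) =====
theorem prepare_pid_to_qid_map_spec : Claim_equal_prepare_pid_to_qid_map := by
  intro td _hdom _hpre
  show prepare_pid_to_qid_map td = prepare_pid_to_qid_map_alt td
  simp only [prepare_pid_to_qid_map, prepare_pid_to_qid_map_alt]
  rw [PySem.List.foldl_congr_mem _ pvAStep pvBAliasStep _
    (fun st av _ => pv_alias_step st av)]
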